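-- pv_equiv track=rewrite | github.com/b-zhu524/usaco_practice | dec_21_bronze/lonely_photo/lonely.py | solve
-- ===== SOURCE A (Python) =====
-- def lonely_cow_subsets(idx, start_lonely, end_lonely):
--     left = idx - start_lonely
--     right = end_lonely - start_lonely - left
--     return left * right + max(left-1, 0) + max(right-1, 0)
--
-- def solve(n, cows):
--     res = 0
--     for i in range(n):
--         start_lonely = i
--         end_lonely = i
--
--         while start_lonely > 0 and cows[start_lonely-1] != cows[i]:
--             start_lonely -= 1
--
--         while end_lonely < n-1 and cows[end_lonely+1] != cows[i]:
--             end_lonely += 1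
--
--         curr_res = lonely_cow_subsets(i, start_lonely, end_lonely)
--         res += curr_res
--     return res
-- ===== SOURCE B (Python) =====
-- def solve(n, cows):
--     # Two O(1)-per-index passes: nearest same-value neighbour via last-seen dicts.
--     prev = {}
--     starts = []
--     for i in range(n):
--         v = cows[i]
--         starts.append(prev[v] + 1 if v in prev else 0)
--         prev[v] = i
--     nxt = {}
--     res = 0
--     for i, s in reversed(list(enumerate(starts))):
--         v = cows[i]
--         end = nxt[v] - 1 if v in nxt else n - 1
--         nxt[v] = i
--         left = i - s
--         right = end - i
--         res += left * right + max(left - 1, 0) + max(right - 1, 0)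
--     return res
-- ===== Notes on version B (the rewrite author's own statement) =====
-- stated objective: faster
-- what changed: Replaces the per-index left/right while-loop scans by two linear passes that track the last-seen index of each value in a dict (forward for nearest same-value occurrence on the left, backward for the right), so each index costs O(1).
import Mathlib
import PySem

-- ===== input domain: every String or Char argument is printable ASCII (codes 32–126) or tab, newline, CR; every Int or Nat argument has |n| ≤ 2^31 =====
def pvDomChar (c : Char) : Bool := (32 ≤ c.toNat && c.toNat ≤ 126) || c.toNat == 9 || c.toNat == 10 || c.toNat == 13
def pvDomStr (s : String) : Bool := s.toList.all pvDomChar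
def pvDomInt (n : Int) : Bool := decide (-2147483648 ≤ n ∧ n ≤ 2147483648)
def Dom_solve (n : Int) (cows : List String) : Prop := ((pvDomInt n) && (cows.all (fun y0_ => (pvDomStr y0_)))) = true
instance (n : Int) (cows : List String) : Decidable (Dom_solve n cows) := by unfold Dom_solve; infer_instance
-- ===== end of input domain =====

-- B replaces A's per-index left/right while-loop scans by two linear passes that keep a
-- last-seen-index dict per value (forward pass: nearest equal cow on the left; backward
-- pass: nearest equal cow on the right); objective: faster (asymptotic).

-- ===== PORT A =====
def lonelyCowSubsets (idx startLonely endLonely : Int) : Int :=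
  let left := idx - startLonely
  let right := endLonely - startLonely - left
  left * right + max (left - 1) 0 + max (right - 1) 0

-- while start_lonely > 0 and cows[start_lonely-1] != cows[i]: start_lonely -= 1
def startLoopA (cows : List String) (c : String) : Nat → Nat
  | 0 => 0
  | s + 1 => if PySem.List.pyGetD cows (s : Int) "" ≠ c then startLoopA cows c s else s + 1

-- while end_lonely < n-1 and cows[end_lonely+1] != cows[i]: end_lonely += 1  (fuel ≥ number of iterations)
def endLoopA (cows : List String) (c : String) (n : Int) : Nat → Int → Int
  | 0, e => e
  | f + 1, e =>
      if e < n - 1 ∧ PySem.List.pyGetD cows (e + 1) "" ≠ c then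
        endLoopA cows c n f (e + 1)
      else e

def solve (n : Int) (cows : List String) : Int :=
  (PySem.List.pyRange 0 n 1).foldl
    (fun res i =>
      res +
        (let c := PySem.List.pyGetD cows i ""
         lonelyCowSubsets i (startLoopA cows c i.toNat : Int)
           (endLoopA cows c n (n - 1 - i).toNat i)))
    0

-- ===== PORT B =====
-- loop body of B's forward pass: read start from the last-seen dict, then record i
def fwdStep (cows : List String) (acc : PySem.Dict String Int × List Int) (i : Int) :
    PySem.Dict String Int × List Int :=
  let v := PySem.List.pyGetD cows i ""
  let s : Int := match acc.1.get? v with | some p => p + 1 | none => 0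
  (acc.1.insert v i, acc.2 ++ [s])

-- loop body of B's backward pass over (i, starts[i]) pairs
def bwdStep (cows : List String) (n : Int) (acc : PySem.Dict String Int × Int) (p : Int × Int) :
    PySem.Dict String Int × Int :=
  let v := PySem.List.pyGetD cows p.1 ""
  let e : Int := match acc.1.get? v with | some q => q - 1 | none => n - 1
  let left := p.1 - p.2
  let right := e - p.1
  (acc.1.insert v p.1, acc.2 + (left * right + max (left - 1) 0 + max (right - 1) 0))

def solve_alt (n : Int) (cows : List String) : Int :=
  ((PySem.List.enumerate
      (((PySem.List.pyRange 0 n 1).foldl (fwdStep cows) (PySem.Dict.empty, [])).2) 0).reverse.foldl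
    (bwdStep cows n) (PySem.Dict.empty, 0)).2

-- ===== PRECONDITION & SPEC =====
-- Pre_ excludes exactly the inputs where A raises IndexError: n larger than len(cows).
def Pre_solve (n : Int) (cows : List String) : Prop := n ≤ (cows.length : Int)
instance (n : Int) (cows : List String) : Decidable (Pre_solve n cows) := by unfold Pre_solve; infer_instance
def pvWitness_solve : Int × List String := (3, ["G", "H", "G"])
def Spec_solve (n : Int) (cows : List String) (out : Int) : Prop := out = solve_alt n cows
instance (n : Int) (cows : List String) (out : Int) : Decidable (Spec_solve n cows out) := by unfold Spec_solve; infer_instance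

-- ===== CLAIM (what is proved, stated in full; the proofs are below) =====
def Claim_equal_solve : Prop := ∀ (n : Int) (cows : List String), Dom_solve n cows → Pre_solve n cows → Spec_solve n cows (solve n cows)

-- ===== LEMMAS AND PROOFS =====

def charAt (cows : List String) (k : Nat) : String := PySem.List.pyGetD cows (k : Int) ""

def fStart (cows : List String) (k : Nat) : Int := (startLoopA cows (charAt cows k) k : Int)

-- first index j with t ≤ j < m and cows[j] = v
def nextOcc (cows : List String) (m t : Nat) (v : String) : Option Nat :=
  (List.range' t (m - t)).find? (fun j => charAt cows j = v)

def eVal (cows : List String) (n : Int) (m k : Nat) (v : String) : Int :=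
  match nextOcc cows m (k + 1) v with
  | some j => (j : Int) - 1
  | none => n - 1

def termB (cows : List String) (n : Int) (m : Nat) (k : Nat) : Int :=
  ((k : Int) - fStart cows k) * (eVal cows n m k (charAt cows k) - (k : Int))
    + max ((k : Int) - fStart cows k - 1) 0
    + max (eVal cows n m k (charAt cows k) - (k : Int) - 1) 0

theorem endLoopA_eq (cows : List String) (v : String) (n : Int) (m : Nat) (hn : (m : Int) = n) :
    ∀ (g k : Nat), k + g + 1 = m → endLoopA cows v n g (k : Int) = eVal cows n m k v := by
  intro g
  induction g with
  | zero =>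
      intro k hk
      simp only [endLoopA, eVal, nextOcc]
      have h1 : m - (k + 1) = 0 := by omega
      rw [h1]
      simp only [List.range', List.find?]
      omega
  | succ f ih =>
      intro k hk
      have hlt : (k : Int) < n - 1 := by omega
      have hcast : (k : Int) + 1 = ((k + 1 : Nat) : Int) := by push_cast; ring
      simp only [endLoopA, hcast]
      have h1 : m - (k + 1) = (m - (k + 2)) + 1 := by omega
      by_cases hc : charAt cows (k + 1) = v
      · rw [if_neg (fun h => h.2 hc)]
        simp only [eVal, nextOcc, h1, List.range'_succ, List.find?]
        simp [hc]
      · rw [if_pos ⟨hlt, hc⟩, ih (k + 1) (by omega)]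
        simp only [eVal, nextOcc, h1, List.range'_succ, List.find?]
        simp [hc]

theorem startLoopA_succ (cows : List String) (v : String) (t : Nat) :
    startLoopA cows v (t + 1) = if charAt cows t ≠ v then startLoopA cows v t else t + 1 := rfl

theorem fwd_inv (cows : List String) (t : Nat) :
    (∀ v, (match (((List.range t).map (fun (k : Nat) => (k : Int))).foldl
        (fwdStep cows) (PySem.Dict.empty, [])).1.get? v with
        | some p => p + 1 | none => 0) = (startLoopA cows v t : Int))
    ∧ (((List.range t).map (fun (k : Nat) => (k : Int))).foldl
        (fwdStep cows) (PySem.Dict.empty, [])).2 = (List.range t).map (fStart cows) := by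
  induction t with
  | zero =>
      constructor
      · intro v
        simp [startLoopA, PySem.Dict.get?_empty]
      · simp
  | succ t ih =>
      obtain ⟨ihd, ihs⟩ := ih
      rw [List.range_succ, List.map_append, List.foldl_append]
      simp only [List.map_cons, List.map_nil, List.foldl_cons, List.foldl_nil]
      constructor
      · intro v
        simp only [fwdStep, PySem.Dict.get?_insert]
        by_cases hv : v = PySem.List.pyGetD cows ((t : Nat) : Int) ""
        · rw [if_pos hv, startLoopA_succ]
          rw [if_neg (by simp [charAt, hv])]
          push_cast; ring
        · rw [if_neg hv, startLoopA_succ]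
          rw [if_pos (fun h => hv h.symm)]
          exact ihd v
      · simp only [fwdStep]
        rw [ihs, List.map_append]
        congr 1
        simp only [List.map_cons, List.map_nil]
        congr 1
        have h := ihd (PySem.List.pyGetD cows ((t : Nat) : Int) "")
        simp only [fStart, charAt]
        rw [← h]

theorem enum_map (g : Nat → Int) (t : Nat) :
    ∀ (s : Int), PySem.List.enumerate ((List.range t).map g) s
      = (List.range t).map (fun (k : Nat) => ((s + (k : Int), g k) : Int × Int)) := by
  induction t with
  | zero => intro s; simp
  | succ t ih =>
      intro s
      rw [List.range_succ, List.map_append, PySem.List.enumerate_append, ih, List.map_append]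
      congr 1
      simp [PySem.List.enumerate, List.length_map, List.length_range]

theorem back_inv (cows : List String) (n : Int) (m : Nat) :
    ∀ (t : Nat) (d : PySem.Dict String Int) (r : Int), t ≤ m →
      (∀ v, d.get? v = (nextOcc cows m t v).map (fun j => (j : Int))) →
      (((List.range t).map (fun (k : Nat) => (((k : Int), fStart cows k) : Int × Int))).reverse.foldl
        (bwdStep cows n) (d, r)).2 = r + ((List.range t).map (termB cows n m)).sum := by
  intro t
  induction t with
  | zero => intro d r _ _; simp
  | succ t ih =>
      intro d r hle hK
      rw [List.range_succ, List.map_append, List.reverse_append]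
      simp only [List.map_cons, List.map_nil, List.reverse_cons, List.reverse_nil,
        List.nil_append, List.singleton_append, List.foldl_cons]
      have he : (match d.get? (charAt cows t) with | some q => q - 1 | none => n - 1)
          = eVal cows n m t (charAt cows t) := by
        rw [hK (charAt cows t)]
        simp only [eVal]
        cases nextOcc cows m (t + 1) (charAt cows t) <;> rfl
      have hrange : m - t = (m - (t + 1)) + 1 := by omega
      have hK' : ∀ v, (d.insert (charAt cows t) ((t : Nat) : Int)).get? v
          = (nextOcc cows m t v).map (fun j => (j : Int)) := by
        intro v
        rw [PySem.Dict.get?_insert]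
        by_cases hv : v = charAt cows t
        · rw [if_pos hv]
          simp only [nextOcc, hrange, List.range'_succ, List.find?]
          simp [hv]
        · rw [if_neg hv]
          rw [hK v]
          simp only [nextOcc, hrange, List.range'_succ, List.find?]
          have hne : ¬ (charAt cows t = v) := fun h => hv h.symm
          simp [hne]
      have hstep : bwdStep cows n (d, r) ((t : Int), fStart cows t)
          = (d.insert (charAt cows t) ((t : Nat) : Int), r + termB cows n m t) := by
        simp only [bwdStep, charAt] at he ⊢
        rw [he]
        simp only [termB, fStart, charAt]
      rw [hstep, ih _ _ (by omega) hK']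
      rw [List.map_append, List.sum_append]
      simp only [List.map_cons, List.map_nil, List.sum_cons, List.sum_nil]
      ring

theorem solve_alt_eq_sum (n : Int) (cows : List String) :
    solve_alt n cows = ((List.range n.toNat).map (termB cows n n.toNat)).sum := by
  unfold solve_alt
  rw [PySem.List.pyRange_zero n]
  rw [(fwd_inv cows n.toNat).2]
  rw [enum_map (fStart cows) n.toNat 0]
  have hmap : (List.range n.toNat).map (fun (k : Nat) => ((0 + (k : Int), fStart cows k) : Int × Int))
      = (List.range n.toNat).map (fun (k : Nat) => (((k : Int), fStart cows k) : Int × Int)) := by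
    simp
  rw [hmap]
  rw [back_inv cows n n.toNat n.toNat PySem.Dict.empty 0 (le_refl _)
    (by intro v; simp [nextOcc, PySem.Dict.get?_empty])]
  ring

theorem solve_eq_sum (n : Int) (cows : List String) :
    solve n cows = ((List.range n.toNat).map (termB cows n n.toNat)).sum := by
  unfold solve
  rw [PySem.List.pyRange_zero n]
  rw [PySem.List.foldl_add]
  rw [List.map_map]
  have hmap : ∀ k ∈ List.range n.toNat,
      ((fun i : Int =>
        (let c := PySem.List.pyGetD cows i ""
         lonelyCowSubsets i (startLoopA cows c i.toNat : Int)
           (endLoopA cows c n (n - 1 - i).toNat i))) ∘ (fun (k : Nat) => (k : Int))) k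
      = termB cows n n.toNat k := by
    intro k hk
    have hkm : k < n.toNat := List.mem_range.mp hk
    have hncast : ((n.toNat : Nat) : Int) = n := Int.toNat_of_nonneg (by omega)
    simp only [Function.comp]
    have htoNat : ((k : Int)).toNat = k := Int.toNat_natCast k
    have hfuel : k + (n - 1 - (k : Int)).toNat + 1 = n.toNat := by omega
    have hend := endLoopA_eq cows (PySem.List.pyGetD cows ((k : Nat) : Int) "") n n.toNat hncast
      (n - 1 - (k : Int)).toNat k hfuel
    simp only [htoNat, hend]
    simp only [lonelyCowSubsets, termB, fStart, charAt]
    have h2 : ∀ e s : Int, e - s - ((k : Int) - s) = e - (k : Int) := by intro e s; ring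
    rw [h2]
  rw [List.map_congr_left hmap]
  ring

theorem solve_eq_solve_alt (n : Int) (cows : List String) : solve n cows = solve_alt n cows := by
  rw [solve_eq_sum, solve_alt_eq_sum]

-- ===== VERDICT (by name: the statement is the Claim_ definition above) =====
theorem solve_spec : Claim_equal_solve := by
  intro n cows _ _
  unfold Spec_solve
  exact solve_eq_solve_alt n cows
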